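-- pv_equiv track=rewrite | github.com/dingding1707/final-year-research-project | preprocess-linkedin-jobs.py | infer_job_category
-- ===== SOURCE A (Python) =====
-- CS_ROLES = [
--     "Software Engineer",
--     "Software Developer",
--     "Backend Developer",
--     "Frontend Developer",
--     "Full Stack Developer",
--     "Mobile Application Developer",
--     "Game Developer",
--     "Embedded Systems Engineer",
--     "DevOps Engineer",
--     "Cloud Engineer",
-- ]
--
-- IT_ROLES = [
--     "IT Support Specialist",
--     "Help Desk Technician",
--     "Network Administrator",
--     "Systems Administrator",
--     "Cybersecurity Analyst",
--     "Information Security Analyst",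
--     "Database Administrator",
--     "IT Project Manager",
--     "IT Operations Analyst",
--     "Infrastructure Engineer",
-- ]
--
-- AI_ROLES = [
--     "Data Scientist",
--     "Machine Learning Engineer",
--     "AI Engineer",
--     "Data Analyst",
--     "Business Intelligence Analyst",
--     "NLP Engineer",
--     "Computer Vision Engineer",
--     "Data Engineer",
--     "MLOps Engineer",
--     "Applied Scientist",
-- ]
--
-- def infer_job_category(job_title: str, title_query: str) -> str:
--     candidates = [title_query or "", job_title or ""]
--     candidates = [c.lower() for c in candidates if c]
--
--     for role in AI_ROLES:
--         r = role.lower()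
--         if any(r in c for c in candidates):
--             return "AI"
--
--     for role in CS_ROLES:
--         r = role.lower()
--         if any(r in c for c in candidates):
--             return "CS"
--
--     for role in IT_ROLES:
--         r = role.lower()
--         if any(r in c for c in candidates):
--             return "IT"
--
--     return "Unknown"
-- ===== SOURCE B (Python) =====
-- AI_ROLES = [
--     "Data Scientist",
--     "Machine Learning Engineer",
--     "AI Engineer",
--     "Data Analyst",
--     "Business Intelligence Analyst",
--     "NLP Engineer",
--     "Computer Vision Engineer",
--     "Data Engineer",
--     "MLOps Engineer",
--     "Applied Scientist",
-- ]
--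
-- CS_ROLES = [
--     "Software Engineer",
--     "Software Developer",
--     "Backend Developer",
--     "Frontend Developer",
--     "Full Stack Developer",
--     "Mobile Application Developer",
--     "Game Developer",
--     "Embedded Systems Engineer",
--     "DevOps Engineer",
--     "Cloud Engineer",
-- ]
--
-- IT_ROLES = [
--     "IT Support Specialist",
--     "Help Desk Technician",
--     "Network Administrator",
--     "Systems Administrator",
--     "Cybersecurity Analyst",
--     "Information Security Analyst",
--     "Database Administrator",
--     "IT Project Manager",
--     "IT Operations Analyst",
--     "Infrastructure Engineer",
-- ]
--
-- # Keyword table pre-lowered once, in priority order AI -> CS -> IT.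
-- _TABLE = [[r.lower() for r in AI_ROLES],
--           [r.lower() for r in CS_ROLES],
--           [r.lower() for r in IT_ROLES]]
-- _CATS = ("AI", "CS", "IT", "Unknown")
--
--
-- def _rank(cl):
--     # index of the first category whose keyword occurs in cl, else 3
--     return next((i for i, kws in enumerate(_TABLE) if any(k in cl for k in kws)), 3)
--
--
-- def infer_job_category(job_title: str, title_query: str) -> str:
--     # candidate-major: take the best (lowest) category rank over the candidates
--     best = 3
--     for c in (title_query, job_title):
--         if c:
--             i = _rank(c.lower())
--             if i < best:
--                 best = i
--     return _CATS[best]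
-- ===== Notes on version B (the rewrite author's own statement) =====
-- stated objective: alternative
-- what changed: Replaces A's three category-major loops (each lowering every role on the fly and scanning all candidates) with a candidate-major scan: a keyword table pre-lowered once at module load, a rank = index of the first matching category per candidate, and the minimum rank over the candidates decoded through a category tuple.
import Mathlib
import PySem

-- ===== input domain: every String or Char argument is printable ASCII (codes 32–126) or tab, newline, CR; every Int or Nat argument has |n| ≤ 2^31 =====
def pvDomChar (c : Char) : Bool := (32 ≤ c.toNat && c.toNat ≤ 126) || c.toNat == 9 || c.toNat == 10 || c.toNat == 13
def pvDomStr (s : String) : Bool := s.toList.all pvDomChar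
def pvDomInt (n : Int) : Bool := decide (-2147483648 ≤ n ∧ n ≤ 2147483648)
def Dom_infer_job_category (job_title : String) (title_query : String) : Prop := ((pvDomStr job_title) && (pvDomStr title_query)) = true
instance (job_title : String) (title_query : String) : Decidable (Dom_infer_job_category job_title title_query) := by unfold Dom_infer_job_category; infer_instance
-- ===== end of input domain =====

-- B replaces A's three category-major substring loops by a candidate-major scan over one
-- pre-lowered keyword table, taking the minimum category rank (objective: alternative).

-- ===== PORT A =====
def AI_ROLES : List String := ["Data Scientist", "Machine Learning Engineer", "AI Engineer",
  "Data Analyst", "Business Intelligence Analyst", "NLP Engineer", "Computer Vision Engineer",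
  "Data Engineer", "MLOps Engineer", "Applied Scientist"]

def CS_ROLES : List String := ["Software Engineer", "Software Developer", "Backend Developer",
  "Frontend Developer", "Full Stack Developer", "Mobile Application Developer", "Game Developer",
  "Embedded Systems Engineer", "DevOps Engineer", "Cloud Engineer"]

def IT_ROLES : List String := ["IT Support Specialist", "Help Desk Technician",
  "Network Administrator", "Systems Administrator", "Cybersecurity Analyst",
  "Information Security Analyst", "Database Administrator", "IT Project Manager",
  "IT Operations Analyst", "Infrastructure Engineer"]

def infer_job_category (job_title : String) (title_query : String) : String :=
  -- candidates = [title_query or "", job_title or ""]  ('x or ""' = x unless x is empty)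
  let candidates : List String :=
    [if title_query == "" then "" else title_query, if job_title == "" then "" else job_title]
  -- candidates = [c.lower() for c in candidates if c]
  let candidates := (candidates.filter (fun c => !(c == ""))).map PySem.Str.lower
  -- the three loops with early return
  if AI_ROLES.any (fun role => candidates.any (fun c => PySem.Str.isIn (PySem.Str.lower role) c)) then "AI"
  else if CS_ROLES.any (fun role => candidates.any (fun c => PySem.Str.isIn (PySem.Str.lower role) c)) then "CS"
  else if IT_ROLES.any (fun role => candidates.any (fun c => PySem.Str.isIn (PySem.Str.lower role) c)) then "IT"
  else "Unknown"

-- ===== PORT B =====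
-- _TABLE: keyword lists pre-lowered once, in priority order AI -> CS -> IT
def pvTable : List (List String) :=
  [AI_ROLES.map PySem.Str.lower, CS_ROLES.map PySem.Str.lower, IT_ROLES.map PySem.Str.lower]

-- _rank(cl) = next((i for i, kws in enumerate(_TABLE) if any(k in cl for k in kws)), 3)
def pvRank (cl : String) : Nat :=
  List.findIdx (fun kws => kws.any (fun k => PySem.Str.isIn k cl)) pvTable

def infer_job_category_alt (job_title : String) (title_query : String) : String :=
  let best := [title_query, job_title].foldl
    (fun best c =>
      if c == "" then best
      else
        let i := pvRank (PySem.Str.lower c)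
        if i < best then i else best) 3
  -- _CATS[best]
  match best with
  | 0 => "AI"
  | 1 => "CS"
  | 2 => "IT"
  | _ => "Unknown"

-- ===== PRECONDITION & SPEC =====
def Spec_infer_job_category (job_title : String) (title_query : String) (out : String) : Prop := out = infer_job_category_alt job_title title_query
instance (job_title : String) (title_query : String) (out : String) : Decidable (Spec_infer_job_category job_title title_query out) := by unfold Spec_infer_job_category; infer_instance

-- ===== CLAIM (what is proved, stated in full; the proofs are below) =====
def Claim_equal_infer_job_category : Prop := ∀ (job_title : String) (title_query : String), Dom_infer_job_category job_title title_query → Spec_infer_job_category job_title title_query (infer_job_category job_title title_query)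

-- ===== LEMMAS AND PROOFS =====
lemma any_or_split {α : Type} (l : List α) (f g : α → Bool) :
    l.any (fun x => f x || g x) = (l.any f || l.any g) := by
  induction l with
  | nil => simp
  | cons a t ih => simp [List.any_cons, ih]; cases f a <;> cases g a <;> simp

-- ===== VERDICT (by name: the statement is the Claim_ definition above) =====
theorem infer_job_category_spec : Claim_equal_infer_job_category := by
  intro job_title title_query _
  unfold Spec_infer_job_category infer_job_category infer_job_category_alt pvRank pvTable
  rcases eq_or_ne title_query "" with htq | htq <;> rcases eq_or_ne job_title "" with hjt | hjt
  · subst htq; subst hjt; rfl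
  · subst htq
    have hjt' : (job_title == "") = false := beq_eq_false_iff_ne.mpr hjt
    simp only [hjt', beq_self_eq_true, if_true, Bool.false_eq_true, if_false,
      Bool.not_true, Bool.not_false,
      List.filter, List.map, List.foldl, List.any_cons, List.any_nil, List.any_map,
      Function.comp_def, Bool.or_false, List.findIdx_cons, List.findIdx_nil]
    generalize AI_ROLES.any (fun r => PySem.Str.isIn (PySem.Str.lower r) (PySem.Str.lower job_title)) = a2
    generalize CS_ROLES.any (fun r => PySem.Str.isIn (PySem.Str.lower r) (PySem.Str.lower job_title)) = c2
    generalize IT_ROLES.any (fun r => PySem.Str.isIn (PySem.Str.lower r) (PySem.Str.lower job_title)) = i2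
    cases a2 <;> cases c2 <;> cases i2 <;> rfl
  · subst hjt
    have htq' : (title_query == "") = false := beq_eq_false_iff_ne.mpr htq
    simp only [htq', beq_self_eq_true, if_true, Bool.false_eq_true, if_false,
      Bool.not_true, Bool.not_false,
      List.filter, List.map, List.foldl, List.any_cons, List.any_nil, List.any_map,
      Function.comp_def, Bool.or_false, List.findIdx_cons, List.findIdx_nil]
    generalize AI_ROLES.any (fun r => PySem.Str.isIn (PySem.Str.lower r) (PySem.Str.lower title_query)) = a1
    generalize CS_ROLES.any (fun r => PySem.Str.isIn (PySem.Str.lower r) (PySem.Str.lower title_query)) = c1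
    generalize IT_ROLES.any (fun r => PySem.Str.isIn (PySem.Str.lower r) (PySem.Str.lower title_query)) = i1
    cases a1 <;> cases c1 <;> cases i1 <;> rfl
  · have htq' : (title_query == "") = false := beq_eq_false_iff_ne.mpr htq
    have hjt' : (job_title == "") = false := beq_eq_false_iff_ne.mpr hjt
    simp only [htq', hjt', Bool.false_eq_true, if_false, Bool.not_false,
      List.filter, List.map, List.foldl, List.any_cons, List.any_nil, List.any_map,
      Function.comp_def, Bool.or_false, List.findIdx_cons, List.findIdx_nil, any_or_split]
    generalize AI_ROLES.any (fun r => PySem.Str.isIn (PySem.Str.lower r) (PySem.Str.lower title_query)) = a1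
    generalize CS_ROLES.any (fun r => PySem.Str.isIn (PySem.Str.lower r) (PySem.Str.lower title_query)) = c1
    generalize IT_ROLES.any (fun r => PySem.Str.isIn (PySem.Str.lower r) (PySem.Str.lower title_query)) = i1
    generalize AI_ROLES.any (fun r => PySem.Str.isIn (PySem.Str.lower r) (PySem.Str.lower job_title)) = a2
    generalize CS_ROLES.any (fun r => PySem.Str.isIn (PySem.Str.lower r) (PySem.Str.lower job_title)) = c2
    generalize IT_ROLES.any (fun r => PySem.Str.isIn (PySem.Str.lower r) (PySem.Str.lower job_title)) = i2
    cases a1 <;> cases c1 <;> cases i1 <;> cases a2 <;> cases c2 <;> cases i2 <;> rfl
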